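-- pv_equiv track=rewrite | github.com/Brandon-Valley/white_paper_art | img_to_color_matrix_ex.py | colors_to_ascii
-- ===== SOURCE A (Python) =====
-- def colors_to_ascii(tile_color_matrix):
--     ascii_chars = " .'`^,:;Il!i><~+_-?][}{1)(|\/tfjrxnuvczXYUJCLQ0OZmwqpdbkhao*#MW&8%B@"
--     leftover_ascii_char = '$'
--     ascii_matrix = []
--     ascii_color_equivs = {}
--
--     for row_list in tile_color_matrix:
--         ascii_row_str = ''
--         for tile_color in row_list:
--
--             if tile_color in ascii_color_equivs:
--                 pass
--             elif len(ascii_chars) != 0: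
--                 ascii_color_equivs[tile_color] = ascii_chars[0]
--                 ascii_chars = ascii_chars[1:] #pop front
--             else:#if all ascii_chars have been used up
--                 ascii_color_equivs[tile_color] = leftover_ascii_char
--
--             ascii_row_str += (ascii_color_equivs[tile_color])
--         ascii_matrix.append(ascii_row_str)
--
--
--
--     return ascii_matrix
-- ===== SOURCE B (Python) =====
-- def colors_to_ascii(tile_color_matrix):
--     ascii_chars = " .'`^,:;Il!i><~+_-?][}{1)(|\/tfjrxnuvczXYUJCLQ0OZmwqpdbkhao*#MW&8%B@"
--     # pass 1: unique colors in first-appearance order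
--     seen = set()
--     uniq = []
--     for row in tile_color_matrix:
--         for color in row:
--             if color not in seen:
--                 seen.add(color)
--                 uniq.append(color)
--     # build the whole mapping table once
--     table = {color: (ascii_chars[i] if i < len(ascii_chars) else '$')
--              for i, color in enumerate(uniq)}
--     # pass 2: translate
--     return [''.join(table[color] for color in row) for row in tile_color_matrix]
-- ===== Notes on version B (the rewrite author's own statement) =====
-- stated objective: alternative
-- what changed: Replaces A's single interleaved pass, which mutates a shrinking ascii_chars string and grows the color dict while emitting output, with a two-phase design: a first pass collects the unique colors in first-appearance order (seen set + ordered list), the complete mapping table is then built once via enumerate with the 68-char overflow to '$', and a separate second pass translates the matrix by pure lookups.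
import Mathlib
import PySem

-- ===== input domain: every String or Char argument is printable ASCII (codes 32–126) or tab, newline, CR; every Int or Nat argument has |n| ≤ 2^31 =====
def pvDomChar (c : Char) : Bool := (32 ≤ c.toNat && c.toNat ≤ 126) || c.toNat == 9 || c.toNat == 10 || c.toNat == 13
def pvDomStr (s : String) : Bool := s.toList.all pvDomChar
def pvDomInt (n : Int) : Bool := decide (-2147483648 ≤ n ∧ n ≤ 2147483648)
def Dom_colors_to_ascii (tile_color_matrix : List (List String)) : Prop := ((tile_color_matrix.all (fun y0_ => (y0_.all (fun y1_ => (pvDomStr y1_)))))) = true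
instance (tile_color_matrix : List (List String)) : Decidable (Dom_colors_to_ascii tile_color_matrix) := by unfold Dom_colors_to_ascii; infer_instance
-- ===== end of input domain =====

-- B is a two-phase re-implementation (collect unique colors, build the full table once, then
-- translate); equal return value proved for all inputs (A is total).

-- ===== PORT A =====
-- the 68-char palette (Python "\/" is backslash + slash)
def asciiCharsA : List Char :=
  " .'`^,:;Il!i><~+_-?][}{1)(|\\/tfjrxnuvczXYUJCLQ0OZmwqpdbkhao*#MW&8%B@".toList

-- one tile of A's interleaved loop: state = (remaining ascii_chars, dict, row string so far)
def tileStepA (ist : List Char × PySem.Dict String Char × List Char) (c : String) :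
    List Char × PySem.Dict String Char × List Char :=
  let (chars, d, s) := ist
  let (chars, d) :=
    if d.contains c then (chars, d)
    else
      match chars with
      | ch :: rest => (rest, d.insert c ch)     -- len(ascii_chars) != 0
      | [] => (chars, d.insert c '$')           -- all chars used up
  (chars, d, s ++ [d.getD c '$'])               -- key is always present here

def colors_to_ascii (tile_color_matrix : List (List String)) : List String :=
  let res := tile_color_matrix.foldl
    (fun (st : List Char × PySem.Dict String Char × List String) row_list =>
      let inner := row_list.foldl tileStepA (st.1, st.2.1, [])
      (inner.1, inner.2.1, st.2.2 ++ [String.ofList inner.2.2]))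
    (asciiCharsA, PySem.Dict.empty, [])
  res.2.2

-- ===== PORT B =====
def colors_to_ascii_alt (tile_color_matrix : List (List String)) : List String :=
  let pass1 := tile_color_matrix.foldl
    (fun (st : PySem.Set String × List String) row =>
      row.foldl (fun st c =>
        if st.1.contains c then st else (PySem.Set.add st.1 c, st.2 ++ [c])) st)
    (PySem.Set.ofList [], [])
  let uniq := pass1.2
  let table : PySem.Dict String Char :=
    (PySem.List.enumerate uniq 0).foldl
      (fun d p =>
        d.insert p.2 (if p.1 < (asciiCharsA.length : Int)
                      then PySem.List.pyGetD asciiCharsA p.1 '$' else '$'))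
      PySem.Dict.empty
  tile_color_matrix.map (fun row => String.ofList (row.map (fun c => table.getD c '$')))

-- ===== PRECONDITION & SPEC =====
def Spec_colors_to_ascii (tile_color_matrix : List (List String)) (out : List String) : Prop := out = colors_to_ascii_alt tile_color_matrix
instance (tile_color_matrix : List (List String)) (out : List String) : Decidable (Spec_colors_to_ascii tile_color_matrix out) := by unfold Spec_colors_to_ascii; infer_instance

-- ===== CLAIM (what is proved, stated in full; the proofs are below) =====
def Claim_equal_colors_to_ascii : Prop := ∀ (tile_color_matrix : List (List String)), Dom_colors_to_ascii tile_color_matrix → Spec_colors_to_ascii tile_color_matrix (colors_to_ascii tile_color_matrix)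

-- ===== LEMMAS AND PROOFS =====

-- the char the i-th distinct color receives
def fch (i : Nat) : Char := asciiCharsA.getD i '$'

-- the value a color receives given the seen-list u ('$' if unseen)
def vOf (u : List String) (c : String) : Char :=
  match u.idxOf? c with
  | some j => fch j
  | none => '$'

-- B's first-pass step
def addC (u : List String) (c : String) : List String :=
  if u.contains c then u else u ++ [c]

-- B's table built from a seen-list
def dOf (u : List String) : PySem.Dict String Char :=
  (PySem.List.enumerate u 0).foldl
    (fun d p =>
      d.insert p.2 (if p.1 < (asciiCharsA.length : Int)
                    then PySem.List.pyGetD asciiCharsA p.1 '$' else '$'))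
    PySem.Dict.empty

theorem valAt_cast (i : Nat) :
    (if (i : Int) < (asciiCharsA.length : Int)
     then PySem.List.pyGetD asciiCharsA (i : Int) '$' else '$') = fch i := by
  rw [PySem.List.pyGetD_natCast]
  by_cases h : i < asciiCharsA.length
  · rw [if_pos (by exact_mod_cast h)]; rfl
  · rw [if_neg (by exact_mod_cast h), fch, List.getD_eq_default _ _ (by omega)]

theorem idxOf?_append_of_mem (u t : List String) (c : String) (h : c ∈ u) :
    (u ++ t).idxOf? c = u.idxOf? c := by
  induction u with
  | nil => cases h
  | cons x xs ih =>
    by_cases hx : x = c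
    · subst hx; simp [List.idxOf?_cons]
    · simp only [List.cons_append, List.idxOf?_cons, beq_iff_eq, hx, if_false]
      rcases List.mem_cons.mp h with h | h
      · exact absurd h.symm hx
      · rw [ih h]

-- generalized lookup lemma for the enumerate/insert fold
theorem get?_enumFold (u : List String) (c : String) : ∀ (i0 : Nat) (d : PySem.Dict String Char),
    u.Nodup → (∀ k ∈ u, d.contains k = false) →
    ((PySem.List.enumerate u (i0 : Int)).foldl
      (fun d p =>
        d.insert p.2 (if p.1 < (asciiCharsA.length : Int)
                      then PySem.List.pyGetD asciiCharsA p.1 '$' else '$')) d).get? c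
    = match u.idxOf? c with
      | some j => some (fch (i0 + j))
      | none => d.get? c := by
  induction u with
  | nil => intro i0 d _ _; simp [PySem.List.enumerate, List.idxOf?]
  | cons x xs ih =>
    intro i0 d hnd hfresh
    rw [PySem.List.enumerate_cons]
    simp only [List.foldl_cons]
    have hcast : (i0 : Int) + 1 = ((i0 + 1 : Nat) : Int) := by push_cast; ring
    rw [hcast, valAt_cast i0]
    have hfresh' : ∀ k ∈ xs, ((d.insert x (fch i0)).contains k) = false := by
      intro k hk
      rw [PySem.Dict.contains_insert]
      have hne : k ≠ x := fun he => (List.nodup_cons.mp hnd).1 (he ▸ hk)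
      simp [hne, hfresh k (List.mem_cons_of_mem _ hk)]
    rw [ih (i0 + 1) _ (List.nodup_cons.mp hnd).2 hfresh']
    by_cases hx : x = c
    · subst hx
      have hnx : x ∉ xs := (List.nodup_cons.mp hnd).1
      have : xs.idxOf? x = none := by
        rw [List.idxOf?_eq_none_iff]; simpa using hnx
      rw [this]
      simp [List.idxOf?_cons, PySem.Dict.get?_insert_self]
    · simp only [List.idxOf?_cons, beq_iff_eq, hx, if_false]
      cases hxs : xs.idxOf? c with
      | none =>
        rw [PySem.Dict.get?_insert, if_neg (fun hcE => hx hcE.symm)]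
        rfl
      | some j =>
        simp only [Option.map_some]
        have : i0 + 1 + j = i0 + (j + 1) := by omega
        rw [this]

theorem get?_dOf (u : List String) (c : String) (hu : u.Nodup) :
    (dOf u).get? c = (u.idxOf? c).map fch := by
  have h := get?_enumFold u c 0 PySem.Dict.empty hu (by simp)
  rw [dOf]
  rw [show ((0 : Nat) : Int) = (0 : Int) by norm_num] at h
  rw [h]
  cases hxs : u.idxOf? c <;> simp [PySem.Dict.get?_empty]

theorem getD_dOf (u : List String) (c : String) (hu : u.Nodup) :
    (dOf u).getD c '$' = vOf u c := by
  rw [PySem.Dict.getD_eq_get?_getD, get?_dOf u c hu, vOf]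
  cases hxs : u.idxOf? c <;> simp

theorem contains_dOf (u : List String) (c : String) (hu : u.Nodup) :
    (dOf u).contains c = u.contains c := by
  rw [PySem.Dict.contains_eq_isSome_get?, get?_dOf u c hu]
  by_cases h : c ∈ u
  · simp [Option.isSome_map, List.isSome_idxOf?, h]
  · have h1 : u.idxOf? c = none := by rw [List.idxOf?_eq_none_iff]; simpa using h
    simp [h1, h]

theorem nodup_addC (u : List String) (c : String) (hu : u.Nodup) : (addC u c).Nodup := by
  rw [addC]
  split_ifs with h
  · exact hu
  · have hc : c ∉ u := fun hm => h (List.contains_iff_mem.mpr hm)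
    simp [List.nodup_append, hu]
    intro a ha hac
    exact hc (hac ▸ ha)

theorem prefix_addC (u : List String) (c : String) : u <+: addC u c := by
  rw [addC]; split_ifs
  · exact List.prefix_refl u
  · exact ⟨[c], rfl⟩

theorem mem_addC (u : List String) (c : String) : c ∈ addC u c := by
  rw [addC]; split_ifs with h
  · exact List.contains_iff_mem.mp h
  · simp

theorem prefix_foldl_addC (l : List String) : ∀ u, u <+: l.foldl addC u := by
  induction l with
  | nil => intro u; exact List.prefix_refl u
  | cons x xs ih => intro u; exact (prefix_addC u x).trans (ih (addC u x))

theorem nodup_foldl_addC (l : List String) : ∀ u, u.Nodup → (l.foldl addC u).Nodup := by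
  induction l with
  | nil => intro u hu; exact hu
  | cons x xs ih => intro u hu; exact ih (addC u x) (nodup_addC u x hu)

theorem mem_foldl_addC (l : List String) : ∀ u c, c ∈ l → c ∈ l.foldl addC u := by
  induction l with
  | nil => intro _ _ h; cases h
  | cons x xs ih =>
    intro u c hc
    rcases List.mem_cons.mp hc with hc | hc
    · subst hc
      exact (prefix_foldl_addC xs (addC u c)).subset (mem_addC u c)
    · exact ih (addC u x) c hc

theorem vOf_stable (u v : List String) (c : String) (hm : c ∈ u) (hp : u <+: v) :
    vOf v c = vOf u c := by
  obtain ⟨t, rfl⟩ := hp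
  rw [vOf, vOf, idxOf?_append_of_mem u t c hm]

theorem dOf_append (u : List String) (c : String) :
    dOf (u ++ [c]) = (dOf u).insert c (fch u.length) := by
  rw [dOf, dOf, PySem.List.enumerate_append, List.foldl_append]
  simp only [PySem.List.enumerate_cons, PySem.List.enumerate_nil, List.foldl_cons,
    List.foldl_nil, zero_add]
  rw [valAt_cast u.length]

-- A's tile step, on the invariant state
theorem tileStepA_inv (u : List String) (c : String) (s : List Char) (hu : u.Nodup) :
    tileStepA (asciiCharsA.drop u.length, dOf u, s) c
      = (asciiCharsA.drop (addC u c).length, dOf (addC u c), s ++ [vOf (addC u c) c]) := by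
  rw [tileStepA.eq_def]
  simp only [contains_dOf u c hu]
  by_cases h : u.contains c = true
  · simp only [h, if_true, addC]
    rw [getD_dOf u c hu]
  · have hcf : u.contains c = false := by simpa using h
    have hcm : c ∉ u := fun hm => by rw [List.contains_iff_mem.mpr hm] at hcf; cases hcf
    have haddc : addC u c = u ++ [c] := by rw [addC, hcf]; simp
    have hidx : (u ++ [c]).idxOf? c = some u.length := by
      rw [← PySem.List.index?_eq_idxOf?]
      exact PySem.List.index?_append_singleton_self u c hcm
    have hv' : vOf (u ++ [c]) c = fch u.length := by simp [vOf, hidx]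
    simp only [hcf, Bool.false_eq_true, if_false]
    by_cases hlen : u.length < asciiCharsA.length
    · rw [List.drop_eq_getElem_cons hlen]
      have hfch : fch u.length = asciiCharsA[u.length] := by
        rw [fch, List.getD_eq_getElem _ _ hlen]
      rw [haddc]
      simp only [List.length_append, List.length_singleton]
      rw [dOf_append u c, hv', hfch]
      rw [PySem.Dict.getD_eq_get?_getD, PySem.Dict.get?_insert_self]
      rfl
    · have hnil : asciiCharsA.drop u.length = [] :=
        List.drop_eq_nil_of_le (by omega)
      have hnil' : asciiCharsA.drop (u.length + 1) = [] :=
        List.drop_eq_nil_of_le (by omega)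
      have hfch : fch u.length = '$' := by
        rw [fch, List.getD_eq_default _ _ (by omega)]
      rw [hnil, haddc]
      simp only [List.length_append, List.length_singleton]
      rw [dOf_append u c, hv', hfch, hnil']
      rw [PySem.Dict.getD_eq_get?_getD, PySem.Dict.get?_insert_self]
      rfl

-- A's row loop
theorem rowFoldA_inv (row : List String) : ∀ (u : List String) (s : List Char), u.Nodup →
    row.foldl tileStepA (asciiCharsA.drop u.length, dOf u, s)
      = (asciiCharsA.drop (row.foldl addC u).length, dOf (row.foldl addC u),
         s ++ row.map (vOf (row.foldl addC u))) := by
  induction row with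
  | nil => intro u s _; simp
  | cons c rest ih =>
    intro u s hu
    rw [List.foldl_cons, tileStepA_inv u c s hu,
      ih (addC u c) (s ++ [vOf (addC u c) c]) (nodup_addC u c hu)]
    have hst : vOf (addC u c) c = vOf (rest.foldl addC (addC u c)) c :=
      (vOf_stable _ _ c (mem_addC u c) (prefix_foldl_addC rest (addC u c))).symm
    rw [hst]
    simp [List.foldl_cons, List.append_assoc]

theorem prefix_matFoldC (m : List (List String)) :
    ∀ (u : List String), u <+: m.foldl (fun u row => row.foldl addC u) u := by
  induction m with
  | nil => intro u; exact List.prefix_refl u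
  | cons row rest ih =>
    intro u
    exact (prefix_foldl_addC row u).trans (ih (row.foldl addC u))

theorem nodup_matFoldC (m : List (List String)) :
    ∀ (u : List String), u.Nodup → (m.foldl (fun u row => row.foldl addC u) u).Nodup := by
  induction m with
  | nil => intro u hu; exact hu
  | cons row rest ih =>
    intro u hu
    exact ih (row.foldl addC u) (nodup_foldl_addC row u hu)

-- A's matrix loop
theorem matFoldA_inv (m : List (List String)) : ∀ (u : List String) (out : List String), u.Nodup →
    m.foldl
      (fun (st : List Char × PySem.Dict String Char × List String) row_list =>
        let inner := row_list.foldl tileStepA (st.1, st.2.1, [])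
        (inner.1, inner.2.1, st.2.2 ++ [String.ofList inner.2.2]))
      (asciiCharsA.drop u.length, dOf u, out)
      = (asciiCharsA.drop (m.foldl (fun u row => row.foldl addC u) u).length,
         dOf (m.foldl (fun u row => row.foldl addC u) u),
         out ++ m.map (fun row =>
           String.ofList (row.map (vOf (m.foldl (fun u row => row.foldl addC u) u))))) := by
  induction m with
  | nil => intro u out _; simp
  | cons row rest ih =>
    intro u out hu
    rw [List.foldl_cons]
    have hrow := rowFoldA_inv row u [] hu
    simp only [List.nil_append] at hrow
    simp only [hrow]
    rw [ih (row.foldl addC u) (out ++ [String.ofList (row.map (vOf (row.foldl addC u)))])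
      (nodup_foldl_addC row u hu)]
    have hmap : row.map (vOf (row.foldl addC u))
        = row.map (vOf (rest.foldl (fun u row => row.foldl addC u) (row.foldl addC u))) := by
      apply List.map_congr_left
      intro c hc
      exact (vOf_stable _ _ c (mem_foldl_addC row u c hc)
        (prefix_matFoldC rest (row.foldl addC u))).symm
    simp only [List.foldl_cons, List.map_cons]
    rw [← hmap]
    simp [List.append_assoc]

-- B's first pass carries (seen set, uniq list); both components evolve as addC
theorem pass1_row (row : List String) : ∀ (u : List String),
    row.foldl (fun (st : PySem.Set String × List String) c =>
      if st.1.contains c then st else (PySem.Set.add st.1 c, st.2 ++ [c])) (u, u)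
    = (row.foldl addC u, row.foldl addC u) := by
  induction row with
  | nil => intro u; rfl
  | cons c rest ih =>
    intro u
    rw [List.foldl_cons, List.foldl_cons]
    have hstep : (if (PySem.Set.contains u c) then ((u : PySem.Set String), u)
          else (PySem.Set.add u c, u ++ [c]))
        = ((addC u c : List String), (addC u c : List String)) := by
      by_cases h : c ∈ u <;>
        simp [addC, PySem.Set.add, PySem.Set.contains, h]
    rw [hstep, ih (addC u c)]

theorem pass1_mat (m : List (List String)) : ∀ (u : List String),
    m.foldl (fun (st : PySem.Set String × List String) row =>
      row.foldl (fun st c =>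
        if st.1.contains c then st else (PySem.Set.add st.1 c, st.2 ++ [c])) st) (u, u)
    = (m.foldl (fun u row => row.foldl addC u) u,
       m.foldl (fun u row => row.foldl addC u) u) := by
  induction m with
  | nil => intro u; rfl
  | cons row rest ih =>
    intro u
    rw [List.foldl_cons, List.foldl_cons, pass1_row row u, ih (row.foldl addC u)]

-- ===== VERDICT (by name: the statement is the Claim_ definition above) =====
theorem colors_to_ascii_spec : Claim_equal_colors_to_ascii := by
  intro m _
  rw [Spec_colors_to_ascii, colors_to_ascii, colors_to_ascii_alt]
  have h0 : (asciiCharsA, (PySem.Dict.empty : PySem.Dict String Char), ([] : List String))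
      = (asciiCharsA.drop ([] : List String).length, dOf [], []) := by
    rfl
  simp only [h0]
  rw [matFoldA_inv m [] [] List.nodup_nil]
  have hpass : (PySem.Set.ofList ([] : List String), ([] : List String))
      = (([] : List String), ([] : List String)) := rfl
  simp only [hpass, pass1_mat m []]
  simp only [List.nil_append]
  apply List.map_congr_left
  intro row _
  congr 1
  apply List.map_congr_left
  intro c _
  exact (getD_dOf _ c (nodup_matFoldC m [] List.nodup_nil)).symm
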